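-- pv_equiv track=rewrite | github.com/TNirvT/adventofcode20 | aoc17.py | part2
-- ===== SOURCE A (Python) =====
-- import itertools
--
-- def part2(lines: list[str]):
--     def get_neighbors(node: tuple[int, int, int, int]) -> set[tuple[int, int, int, int]]:
--         tmp = [x for x in itertools.product((-1, 0, 1), repeat=4)]
--         tmp.remove((0, 0, 0, 0))
--         neighbors = set(tuple(sum(x) for x in zip(node, vect)) for vect in tmp)
--         return neighbors
--
--     active_nodes = set()
--     for i, line in enumerate(lines):
--         for j, char in enumerate(line):
--             if char == "#":
--                 active_nodes.add((j, -i, 0, 0))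
--
--     def one_cycle(active_nodes: set[tuple[int, int, int, int]]) -> None:
--         energy = dict()
--         for node in active_nodes:
--             neighbors = get_neighbors(node)
--             for neighbor in neighbors:
--                 if energy.get(neighbor):
--                     energy[neighbor] += 1
--                 else:
--                     energy[neighbor] = 1
--
--         for node in active_nodes:
--             if node not in energy.keys():
--                 energy[node] = 0
--
--         for node, level in energy.items():
--             if node in active_nodes and level != 2 and level != 3:
--                 active_nodes.remove(node)
--             elif node not in active_nodes and level == 3:
--                 active_nodes.add(node)
--
--     for _ in range(6):
--         one_cycle(active_nodes)
--
--     return len(active_nodes)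
-- ===== SOURCE B (Python) =====
-- import itertools
--
--
-- def part2(lines: list[str]):
--     # sort-and-scan instead of hash sets: the active region is a sorted duplicate-free
--     # list of cells; each cycle k-way-merges the 80 sorted neighbor-translate lists and
--     # reads neighbor counts off the run lengths of the merged multiset.
--     offsets = [d for d in itertools.product((-1, 0, 1), repeat=4) if d != (0, 0, 0, 0)]
--
--     def merge(xs, ys):
--         out = []
--         i = j = 0
--         while i < len(xs) and j < len(ys):
--             if xs[i] <= ys[j]:
--                 out.append(xs[i]); i += 1
--             else:
--                 out.append(ys[j]); j += 1
--         return out + xs[i:] + ys[j:]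
--
--     def merge_all(runs):
--         if not runs:
--             return []
--         while len(runs) > 1:
--             runs = [merge(runs[k], runs[k + 1])
--                     for k in range(0, len(runs) - 1, 2)] + \
--                    ([runs[-1]] if len(runs) % 2 else [])
--         return runs[0]
--
--     active = merge_all([[(j, -i, 0, 0)]
--                         for i, line in enumerate(lines)
--                         for j, ch in enumerate(line) if ch == "#"])
--     for _ in range(6):
--         trans = merge_all([[tuple(a + b for a, b in zip(c, d)) for d in offsets]
--                            for c in active])
--         nxt = []
--         run_cell, run_len = None, 0
--         for cell in trans:
--             if cell == run_cell:
--                 run_len += 1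
--             else:
--                 if run_len == 3 or (run_len == 2 and run_cell in active):
--                     nxt.append(run_cell)
--                 run_cell, run_len = cell, 1
--         if run_len == 3 or (run_len == 2 and run_cell in active):
--             nxt.append(run_cell)
--         active = nxt
--     return len(active)
-- ===== Notes on version B (the rewrite author's own statement) =====
-- stated objective: alternative
-- what changed: A scatters each active cell's 80 neighbor contributions into a dict of energy levels and then walks the dict's items mutating the active set; B keeps the active region as a sorted duplicate-free list, k-way-merges the 80 sorted neighbor-translate lists each cycle, and reads the neighbor counts off the run lengths of the merged multiset in one scan — sort-and-scan instead of hash sets, with no dict or set at all.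
import Mathlib
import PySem

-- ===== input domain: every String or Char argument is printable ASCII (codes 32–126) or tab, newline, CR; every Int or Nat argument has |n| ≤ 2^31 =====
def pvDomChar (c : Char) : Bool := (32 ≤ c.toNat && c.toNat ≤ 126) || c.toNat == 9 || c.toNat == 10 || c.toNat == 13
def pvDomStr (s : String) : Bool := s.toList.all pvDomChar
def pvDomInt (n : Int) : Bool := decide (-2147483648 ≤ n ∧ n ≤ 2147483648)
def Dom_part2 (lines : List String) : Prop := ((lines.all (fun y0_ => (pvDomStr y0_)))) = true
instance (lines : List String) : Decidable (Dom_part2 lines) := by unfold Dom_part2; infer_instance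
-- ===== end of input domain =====

-- B replaces A's scatter (a dict of neighbor counts accumulated from each active cell) by a
-- sort-and-scan: k-way-merge of the 80 sorted neighbor-translate lists per cycle, with the
-- neighbor counts read off run lengths; objective: alternative algorithm, no hashing.
-- (A's internal Python dict is modeled by Std.HashMap so the port evaluates; the third
-- loop's result is proved independent of the item iteration order.)


-- a 4-tuple cell (j, k, z, w)
abbrev pvCell : Type := Int × Int × Int × Int

-- tuple(a + b for a, b in zip(u, v))  (this zip-sum appears verbatim in both A and B)
def pvAdd4 (u v : pvCell) : pvCell :=
  (u.1 + v.1, u.2.1 + v.2.1, u.2.2.1 + v.2.2.1, u.2.2.2 + v.2.2.2)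

-- ===== PORT A =====
-- [x for x in itertools.product((-1, 0, 1), repeat=4)]
def part2_product : List pvCell :=
  ([-1, 0, 1] : List Int).flatMap (fun a =>
    ([-1, 0, 1] : List Int).flatMap (fun b =>
      ([-1, 0, 1] : List Int).flatMap (fun c =>
        ([-1, 0, 1] : List Int).map (fun d => (a, b, c, d)))))

-- get_neighbors; tmp.remove(origin) never raises (the origin is in the product list),
-- so the total form (remove? ..).getD is exact here
def part2_neighbors (node : pvCell) : PySem.Set pvCell :=
  PySem.Set.ofList
    (((PySem.List.remove? part2_product ((0 : Int), (0 : Int), (0 : Int), (0 : Int))).getD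
      part2_product).map (fun vect => pvAdd4 node vect))

-- one_cycle (returns the new set instead of mutating in place; same value).  The local
-- dict 'energy' is modeled by Std.HashMap (same get/contains/setitem/items steps; the
-- third loop's outcome is proved independent of the items order below, so toList's
-- order is as good as Python's insertion order); its two reassignments are written as
-- nested expressions; set.remove is guarded by membership, so the total form
-- (remove? ..).getD is exact, and the items list is fixed before the set is updated,
-- as in the Python
def part2_cycle (active : PySem.Set pvCell) : PySem.Set pvCell :=
  (active.foldl (fun d node => if d.contains node then d else d.insert node 0)
    (active.foldl (fun d node =>
      (part2_neighbors node).foldl (fun d neighbor =>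
        -- 'if energy.get(neighbor):' — truthy iff present with a non-zero value
        if d.getD neighbor 0 ≠ 0 then d.insert neighbor (d.getD neighbor 0 + 1)
        else d.insert neighbor 1) d) (∅ : Std.HashMap pvCell Int))).toList.foldl
    (fun s p =>
      if p.1 ∈ s ∧ p.2 ≠ 2 ∧ p.2 ≠ 3 then (PySem.Set.remove? s p.1).getD s
      else if p.1 ∉ s ∧ p.2 = 3 then s.add p.1
      else s) active

def part2 (lines : List String) : Int :=
  PySem.Set.len
    ((PySem.List.pyRange 0 6 1).foldl (fun s _ => part2_cycle s)
      ((PySem.List.enumerate lines 0).foldl (fun s il =>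
        (PySem.List.enumerate il.2.toList 0).foldl (fun s jc =>
          if jc.2 = '#' then s.add ((jc.1, -il.1, (0 : Int), (0 : Int)) : pvCell) else s) s)
        PySem.Set.empty))

-- ===== PORT B =====
-- offsets = [d for d in itertools.product((-1,0,1), repeat=4) if d != (0,0,0,0)]
def part2_alt_offsets : List pvCell :=
  (([-1, 0, 1] : List Int).flatMap (fun a =>
    ([-1, 0, 1] : List Int).flatMap (fun b =>
      ([-1, 0, 1] : List Int).flatMap (fun c =>
        ([-1, 0, 1] : List Int).map (fun d => ((a, b, c, d) : pvCell)))))).filter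
    (fun d => d ≠ ((0 : Int), (0 : Int), (0 : Int), (0 : Int)))

-- Python's tuple comparison xs[i] <= ys[j], lexicographic (exact for 4-tuples of ints)
def pvLe4 (u v : pvCell) : Bool :=
  decide (u.1 < v.1) || (u.1 == v.1 && (decide (u.2.1 < v.2.1) || (u.2.1 == v.2.1 &&
    (decide (u.2.2.1 < v.2.2.1) || (u.2.2.1 == v.2.2.1 && decide (u.2.2.2 ≤ v.2.2.2))))))

-- merge(xs, ys): the while loop's 'out' accumulator is carried reversed (appends become
-- conses) and reversed at the end, then the remaining suffixes are appended, as in Python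
def part2_alt_merge (out : List pvCell) : List pvCell → List pvCell → List pvCell
  | [], ys => out.reverse ++ ys
  | x :: xs, [] => out.reverse ++ x :: xs
  | x :: xs, y :: ys =>
    if pvLe4 x y then part2_alt_merge (x :: out) xs (y :: ys)
    else part2_alt_merge (y :: out) (x :: xs) ys
  termination_by xs ys => xs.length + ys.length

def part2_alt_mergePairs : List (List pvCell) → List (List pvCell)
  | a :: b :: t => part2_alt_merge [] a b :: part2_alt_mergePairs t
  | t => t

-- the while-loop of merge_all terminates: one round halves the number of runs
lemma part2_alt_mergePairs_length : ∀ (l : List (List pvCell)),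
    (part2_alt_mergePairs l).length ≤ l.length
  | [] => by simp [part2_alt_mergePairs]
  | [_] => by simp [part2_alt_mergePairs]
  | a :: b :: t => by
    simp only [part2_alt_mergePairs, List.length_cons]
    have := part2_alt_mergePairs_length t
    omega

def part2_alt_mergeAll : List (List pvCell) → List pvCell
  | [] => []
  | [x] => x
  | a :: b :: t => part2_alt_mergeAll (part2_alt_mergePairs (a :: b :: t))
  termination_by l => l.length
  decreasing_by
    simp only [part2_alt_mergePairs, List.length_cons]
    exact Nat.lt_succ_of_le (Nat.succ_le_succ (part2_alt_mergePairs_length t))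

-- 'if run_len == 3 or (run_len == 2 and run_cell in active): nxt.append(run_cell)'
-- (run_cell is None only while run_len == 0, where the condition is False)
def part2_alt_flush (active : List pvCell) (rc : Option pvCell) (rl : Int) : List pvCell :=
  match rc with
  | some r => if rl = 3 ∨ (rl = 2 ∧ r ∈ active) then [r] else []
  | none => []

-- the run-length scan over the merged multiset (state: run_cell, run_len, nxt)
def part2_alt_sel (active : List pvCell) :
    List pvCell → Option pvCell → Int → List pvCell → List pvCell
  | [], rc, rl, out => out ++ part2_alt_flush active rc rl
  | cell :: rest, rc, rl, out =>
    if (match rc with | some r => cell == r | none => false) then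
      part2_alt_sel active rest rc (rl + 1) out
    else
      part2_alt_sel active rest (some cell) 1 (out ++ part2_alt_flush active rc rl)

-- the body of B's 'for _ in range(6)' loop
def part2_alt_cycle (active : List pvCell) : List pvCell :=
  part2_alt_sel active
    (part2_alt_mergeAll (active.map (fun c => part2_alt_offsets.map (fun d => pvAdd4 c d))))
    none 0 []

def part2_alt (lines : List String) : Int :=
  ((PySem.List.pyRange 0 6 1).foldl (fun s _ => part2_alt_cycle s)
    (part2_alt_mergeAll
      (((PySem.List.enumerate lines 0).flatMap (fun il =>
        (PySem.List.enumerate il.2.toList 0).filterMap (fun jc =>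
          if jc.2 = '#' then some ((jc.1, -il.1, (0 : Int), (0 : Int)) : pvCell)
          else none))).map (fun c => [c])))).length

-- ===== PRECONDITION & SPEC =====
def Spec_part2 (lines : List String) (out : Int) : Prop := out = part2_alt lines
instance (lines : List String) (out : Int) : Decidable (Spec_part2 lines out) := by unfold Spec_part2; infer_instance

-- ===== CLAIM (what is proved, stated in full; the proofs are below) =====
def Claim_equal_part2 : Prop := ∀ (lines : List String), Dom_part2 lines → Spec_part2 lines (part2 lines)

-- ===== LEMMAS AND PROOFS =====

-- proof-only abbreviations
def pvSub4 (u v : pvCell) : pvCell :=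
  (u.1 - v.1, u.2.1 - v.2.1, u.2.2.1 - v.2.2.1, u.2.2.2 - v.2.2.2)

def pvNeg4 (u : pvCell) : pvCell := (-u.1, -u.2.1, -u.2.2.1, -u.2.2.2)

def pvNbrs (m : pvCell) : List pvCell := part2_alt_offsets.map (fun v => pvAdd4 m v)

def pvCnt (s : List pvCell) (x : pvCell) : Nat :=
  part2_alt_offsets.countP (fun d => decide (pvAdd4 x d ∈ s))

def pvRule (b : Prop) (v : Int) : Prop := (b ∧ (v = 2 ∨ v = 3)) ∨ (¬ b ∧ v = 3)

def pvCand (s : List pvCell) (x : pvCell) : Prop :=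
  x ∈ s ∨ ∃ m ∈ s, ∃ d ∈ part2_alt_offsets, x = pvAdd4 m d

def pvle (a b : pvCell) : Prop := pvLe4 a b = true

-- the merge loop without its accumulator (proof-side mirror of part2_alt_merge)
def pvMerge : List pvCell → List pvCell → List pvCell
  | [], ys => ys
  | x :: xs, [] => x :: xs
  | x :: xs, y :: ys =>
    if pvLe4 x y then x :: pvMerge xs (y :: ys) else y :: pvMerge (x :: xs) ys
  termination_by xs ys => xs.length + ys.length

lemma pv_off_nodup : part2_alt_offsets.Nodup := by decide

lemma pv_off_neg : ∀ x ∈ part2_alt_offsets, pvNeg4 x ∈ part2_alt_offsets := by decide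

lemma pv_off_sorted : part2_alt_offsets.Pairwise pvle := by
  have h : part2_alt_offsets.Pairwise (fun a b => pvLe4 a b = true) := by decide
  exact h

lemma pv_remove_eq :
    (PySem.List.remove? part2_product ((0 : Int), (0 : Int), (0 : Int), (0 : Int))).getD
      part2_product = part2_alt_offsets := by decide

lemma pvNeg4_neg4 (x : pvCell) : pvNeg4 (pvNeg4 x) = x := by
  obtain ⟨a, b, c, d⟩ := x; simp [pvNeg4]

lemma pv_off_neg_iff (x : pvCell) : pvNeg4 x ∈ part2_alt_offsets ↔ x ∈ part2_alt_offsets := by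
  constructor
  · intro h; have := pv_off_neg _ h; rwa [pvNeg4_neg4] at this
  · exact pv_off_neg x

lemma pvAdd4_eq_iff (n d x : pvCell) : x = pvAdd4 n d ↔ d = pvSub4 x n := by
  obtain ⟨a, b, c, e⟩ := n; obtain ⟨a', b', c', e'⟩ := d; obtain ⟨a'', b'', c'', e''⟩ := x
  simp only [pvAdd4, pvSub4, Prod.ext_iff]
  constructor <;> (intro h; omega)

lemma pvAdd4_left_inj (m : pvCell) : Function.Injective (fun v => pvAdd4 m v) := by
  intro a b h
  obtain ⟨a1, a2, a3, a4⟩ := a; obtain ⟨b1, b2, b3, b4⟩ := b; obtain ⟨m1, m2, m3, m4⟩ := m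
  simp only [pvAdd4, Prod.ext_iff] at h ⊢
  omega

lemma pvSub4_right_inj (n : pvCell) : Function.Injective (fun m => pvSub4 m n) := by
  intro a b h
  obtain ⟨a1, a2, a3, a4⟩ := a; obtain ⟨b1, b2, b3, b4⟩ := b; obtain ⟨n1, n2, n3, n4⟩ := n
  simp only [pvSub4, Prod.ext_iff] at h ⊢
  omega

lemma pvSub4_eq_iff (m n y : pvCell) : pvSub4 m n = y ↔ m = pvAdd4 n y := by
  obtain ⟨a, b, c, e⟩ := n; obtain ⟨a', b', c', e'⟩ := y; obtain ⟨a'', b'', c'', e''⟩ := m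
  simp only [pvAdd4, pvSub4, Prod.ext_iff]
  constructor <;> (intro h; omega)

lemma pvSub4_add4 (n y : pvCell) : pvSub4 n (pvAdd4 n y) = pvNeg4 y := by
  obtain ⟨a, b, c, e⟩ := n; obtain ⟨a', b', c', e'⟩ := y
  simp only [pvAdd4, pvSub4, pvNeg4, Prod.ext_iff]
  omega

lemma pvAdd4_neg_cancel (x d : pvCell) : pvAdd4 (pvAdd4 x d) (pvNeg4 d) = x := by
  obtain ⟨a, b, c, e⟩ := x; obtain ⟨a', b', c', e'⟩ := d
  simp only [pvAdd4, pvNeg4, Prod.ext_iff]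
  omega

lemma pv_nbrs_nodup (m : pvCell) : (pvNbrs m).Nodup :=
  pv_off_nodup.map (pvAdd4_left_inj m)

lemma pv_neighbors_eq (n : pvCell) : part2_neighbors n = pvNbrs n := by
  unfold part2_neighbors
  rw [pv_remove_eq]
  exact PySem.Set.ofList_eq_self_of_nodup _ (pv_nbrs_nodup n)

lemma pv_mem_nbrs (m x : pvCell) : x ∈ pvNbrs m ↔ pvSub4 x m ∈ part2_alt_offsets := by
  simp only [pvNbrs, List.mem_map]
  constructor
  · rintro ⟨d, hd, rfl⟩
    rwa [(pvAdd4_eq_iff m d _).mp rfl] at hd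
  · intro h
    exact ⟨pvSub4 x m, h, ((pvAdd4_eq_iff m (pvSub4 x m) x).mpr rfl).symm⟩

-- scatter/gather identity: the number of active cells reaching x equals the number of
-- offsets whose translate of x is active (the offset list is closed under negation)
lemma pv_countP_flip (s : List pvCell) (hs : s.Nodup) (x : pvCell) :
    s.countP (fun m => decide (pvSub4 x m ∈ part2_alt_offsets)) = pvCnt s x := by
  unfold pvCnt
  rw [List.countP_eq_length_filter, List.countP_eq_length_filter]
  have hL : ((s.filter (fun m => decide (pvSub4 x m ∈ part2_alt_offsets))).map
      (fun m => pvSub4 m x)).Nodup :=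
    (hs.filter _).map (pvSub4_right_inj x)
  have hR : (part2_alt_offsets.filter (fun d => decide (pvAdd4 x d ∈ s))).Nodup :=
    pv_off_nodup.filter _
  have hmem : ∀ y, (y ∈ (s.filter (fun m => decide (pvSub4 x m ∈ part2_alt_offsets))).map
      (fun m => pvSub4 m x) ↔
      y ∈ part2_alt_offsets.filter (fun d => decide (pvAdd4 x d ∈ s))) := by
    intro y
    simp only [List.mem_map, List.mem_filter, decide_eq_true_eq]
    constructor
    · rintro ⟨m, ⟨hms, hmo⟩, hy⟩
      have hm : m = pvAdd4 x y := (pvSub4_eq_iff m x y).mp hy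
      subst hm
      rw [pvSub4_add4] at hmo
      exact ⟨(pv_off_neg_iff y).mp hmo, hms⟩
    · rintro ⟨hyo, hys⟩
      refine ⟨pvAdd4 x y, ⟨hys, ?_⟩, ?_⟩
      · rw [pvSub4_add4]
        exact (pv_off_neg_iff y).mpr hyo
      · exact (pvSub4_eq_iff _ x y).mpr rfl
  have hlen := ((List.perm_ext_iff_of_nodup hL hR).mpr hmem).length_eq
  simpa using hlen

lemma pv_count_flat (s : List pvCell) (hs : s.Nodup) (x : pvCell) :
    (s.flatMap pvNbrs).count x = pvCnt s x := by
  rw [List.count_flatMap]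
  have h1 : ∀ m ∈ s, (List.count x ∘ pvNbrs) m =
      if (fun m => decide (pvSub4 x m ∈ part2_alt_offsets)) m = true then 1 else 0 := by
    intro m _
    simp only [Function.comp, decide_eq_true_eq]
    rw [List.Nodup.count (pv_nbrs_nodup m)]
    by_cases h : x ∈ pvNbrs m
    · rw [if_pos h, if_pos ((pv_mem_nbrs m x).mp h)]
    · rw [if_neg h, if_neg (fun hc => h ((pv_mem_nbrs m x).mpr hc))]
  rw [List.map_congr_left h1, PySem.List.sum_map_ite_one_zero_nat]
  exact pv_countP_flip s hs x

lemma pv_loop1_body :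
    (fun (d : Std.HashMap pvCell Int) neighbor =>
      if d.getD neighbor 0 ≠ 0 then d.insert neighbor (d.getD neighbor 0 + 1)
      else d.insert neighbor 1) =
    (fun (d : Std.HashMap pvCell Int) neighbor => d.insert neighbor (d.getD neighbor 0 + 1)) := by
  funext d nb
  by_cases h : d.getD nb 0 ≠ 0
  · rw [if_pos h]
  · rw [if_neg h]
    have h0 : d.getD nb 0 = 0 := by omega
    rw [h0]
    norm_num

-- the counting loop over a HashMap
lemma pv_hm_getD : ∀ (l : List pvCell) (m : Std.HashMap pvCell Int) (x : pvCell),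
    (l.foldl (fun m k => m.insert k (m.getD k 0 + 1)) m).getD x 0 =
      m.getD x 0 + (l.count x : Int) := by
  intro l
  induction l with
  | nil => intro m x; simp
  | cons k l ih =>
    intro m x
    rw [List.foldl_cons, ih, Std.HashMap.getD_insert, List.count_cons]
    by_cases hk : k = x
    · subst hk
      rw [if_pos (by simp), if_pos (by simp)]
      push_cast
      omega
    · rw [if_neg (by simpa using hk), if_neg (by simpa using hk)]
      push_cast
      omega

lemma pv_hm_contains : ∀ (l : List pvCell) (m : Std.HashMap pvCell Int) (x : pvCell),
    ((l.foldl (fun m k => m.insert k (m.getD k 0 + 1)) m).contains x = true ↔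
      (m.contains x = true ∨ x ∈ l)) := by
  intro l
  induction l with
  | nil => intro m x; simp
  | cons k l ih =>
    intro m x
    rw [List.foldl_cons, ih, Std.HashMap.contains_insert]
    simp only [Bool.or_eq_true, beq_iff_eq, List.mem_cons]
    tauto

-- the second loop: 'if node not in energy: energy[node] = 0'
lemma pv_loop2 : ∀ (l : List pvCell) (m : Std.HashMap pvCell Int),
    (∀ x, (l.foldl (fun m n => if m.contains n then m else m.insert n 0) m).getD x 0 =
      m.getD x 0) ∧
    (∀ x, ((l.foldl (fun m n => if m.contains n then m else m.insert n 0) m).contains x = true ↔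
      (m.contains x = true ∨ x ∈ l))) := by
  intro l
  induction l with
  | nil => intro m; exact ⟨fun _ => rfl, fun x => by simp⟩
  | cons n l ih =>
    intro m
    by_cases hc : m.contains n = true
    · rw [List.foldl_cons, if_pos hc]
      refine ⟨(ih m).1, fun x => ?_⟩
      rw [(ih m).2 x]
      simp only [List.mem_cons]
      constructor
      · rintro (h | h)
        · exact Or.inl h
        · exact Or.inr (Or.inr h)
      · rintro (h | rfl | h)
        · exact Or.inl h
        · exact Or.inl hc
        · exact Or.inr h
    · have hc' : m.contains n = false := by simpa using hc
      rw [List.foldl_cons, if_neg hc]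
      constructor
      · intro x
        rw [(ih (m.insert n 0)).1 x, Std.HashMap.getD_insert]
        by_cases hx : n = x
        · rw [if_pos (by simpa using hx)]
          subst hx
          rw [Std.HashMap.getD_eq_fallback_of_contains_eq_false hc']
        · rw [if_neg (by simpa using hx)]
      · intro x
        rw [(ih (m.insert n 0)).2 x, Std.HashMap.contains_insert]
        simp only [Bool.or_eq_true, beq_iff_eq, List.mem_cons]
        tauto

lemma pv_keysNodup (m : Std.HashMap pvCell Int) : (m.toList.map Prod.fst).Nodup := by
  refine List.pairwise_map.mpr (Std.HashMap.distinct_keys_toList.imp ?_)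
  intro a b hab
  simpa using hab

lemma pv_item_iff (m : Std.HashMap pvCell Int) (x : pvCell) (v : Int) :
    ((x, v) ∈ m.toList ↔ (m.contains x = true ∧ v = m.getD x 0)) := by
  rw [Std.HashMap.mem_toList_iff_getElem?_eq_some, Std.HashMap.contains_eq_isSome_getElem?,
    Std.HashMap.getD_eq_getD_getElem?]
  constructor
  · rintro h
    rw [h]
    exact ⟨rfl, rfl⟩
  · rintro ⟨h1, h2⟩
    obtain ⟨w, hw⟩ := Option.isSome_iff_exists.mp h1
    rw [hw] at h2 ⊢
    simpa using h2.symm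

lemma pv_memKeys (m : Std.HashMap pvCell Int) (x : pvCell) :
    (x ∈ m.toList.map Prod.fst ↔ m.contains x = true) := by
  rw [Std.HashMap.contains_eq_isSome_getElem?]
  simp only [List.mem_map]
  constructor
  · rintro ⟨⟨k, v⟩, hkv, rfl⟩
    rw [Std.HashMap.mem_toList_iff_getElem?_eq_some.mp hkv]
    rfl
  · intro h
    obtain ⟨w, hw⟩ := Option.isSome_iff_exists.mp h
    exact ⟨(x, w), Std.HashMap.mem_toList_iff_getElem?_eq_some.mpr hw, rfl⟩

-- the third loop of one_cycle: fold over the items of a dict with distinct keys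
lemma pv_L3 (items : List (pvCell × Int)) : ∀ (t s : List pvCell), t.Nodup →
    (items.map Prod.fst).Nodup → (∀ p ∈ items, (p.1 ∈ t ↔ p.1 ∈ s)) →
    (items.foldl (fun s p =>
        if p.1 ∈ s ∧ p.2 ≠ 2 ∧ p.2 ≠ 3 then (PySem.Set.remove? s p.1).getD s
        else if p.1 ∉ s ∧ p.2 = 3 then s.add p.1
        else s) t).Nodup ∧
    ∀ x, (x ∈ items.foldl (fun s p =>
        if p.1 ∈ s ∧ p.2 ≠ 2 ∧ p.2 ≠ 3 then (PySem.Set.remove? s p.1).getD s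
        else if p.1 ∉ s ∧ p.2 = 3 then s.add p.1
        else s) t ↔
      ((∃ v, (x, v) ∈ items ∧ pvRule (x ∈ s) v) ∨ (x ∈ t ∧ x ∉ items.map Prod.fst))) := by
  induction items with
  | nil => intro t s ht _ _; simpa using ht
  | cons p rest ih =>
    intro t s ht hkeys hts
    obtain ⟨n, v⟩ := p
    have hknd : (rest.map Prod.fst).Nodup := (List.nodup_cons.mp hkeys).2
    have hnk : n ∉ rest.map Prod.fst := (List.nodup_cons.mp hkeys).1
    have hns : n ∈ t ↔ n ∈ s := hts (n, v) List.mem_cons_self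
    set t' := (if n ∈ t ∧ v ≠ 2 ∧ v ≠ 3 then (PySem.Set.remove? t n).getD t
        else if n ∉ t ∧ v = 3 then PySem.Set.add t n
        else t) with ht'def
    have ht'nodup : t'.Nodup := by
      rw [ht'def]
      split_ifs with h1 h2
      · rw [PySem.Set.remove?_of_mem h1.1, Option.getD_some]
        exact PySem.Set.nodup_discard t n ht
      · exact PySem.Set.nodup_add t n ht
      · exact ht
    have ht'mem : ∀ x, x ≠ n → (x ∈ t' ↔ x ∈ t) := by
      intro x hx
      rw [ht'def]
      split_ifs with h1 h2
      · rw [PySem.Set.remove?_of_mem h1.1, Option.getD_some, PySem.Set.mem_discard]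
        exact ⟨fun h => h.1, fun h => ⟨h, hx⟩⟩
      · rw [PySem.Set.mem_add]
        exact ⟨fun h => h.resolve_right hx, Or.inl⟩
      · exact Iff.rfl
    have ht'n : n ∈ t' ↔ pvRule (n ∈ s) v := by
      rw [ht'def]
      unfold pvRule
      split_ifs with h1 h2
      · rw [PySem.Set.remove?_of_mem h1.1, Option.getD_some, PySem.Set.mem_discard]
        constructor
        · intro h
          exact absurd rfl h.2
        · rintro (⟨_, h⟩ | ⟨hn, _⟩)
          · rcases h with h | h
            · exact absurd h h1.2.1
            · exact absurd h h1.2.2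
          · exact absurd (hns.mp h1.1) hn
      · rw [PySem.Set.mem_add]
        constructor
        · intro _
          exact Or.inr ⟨fun hn => h2.1 (hns.mpr hn), h2.2⟩
        · intro _
          exact Or.inr rfl
      · constructor
        · intro hn
          have hv : v = 2 ∨ v = 3 := by
            by_cases h2' : v = 2
            · exact Or.inl h2'
            · by_cases h3' : v = 3
              · exact Or.inr h3'
              · exact absurd ⟨hn, h2', h3'⟩ h1
          exact Or.inl ⟨hns.mp hn, hv⟩
        · rintro (⟨hb, _⟩ | ⟨hb, hv3⟩)
          · exact hns.mpr hb
          · by_cases hn : n ∈ t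
            · exact hn
            · exact absurd ⟨hn, hv3⟩ h2
    have hrest : ∀ q ∈ rest, (q.1 ∈ t' ↔ q.1 ∈ s) := by
      intro q hq
      have hqn : q.1 ≠ n := fun h => hnk (h ▸ List.mem_map_of_mem hq)
      rw [ht'mem q.1 hqn]
      exact hts q (List.mem_cons_of_mem _ hq)
    obtain ⟨ihnd, ihmem⟩ := ih t' s ht'nodup hknd hrest
    have hfold : List.foldl (fun s p =>
        if p.1 ∈ s ∧ p.2 ≠ 2 ∧ p.2 ≠ 3 then (PySem.Set.remove? s p.1).getD s
        else if p.1 ∉ s ∧ p.2 = 3 then s.add p.1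
        else s) t ((n, v) :: rest) = List.foldl (fun s p =>
        if p.1 ∈ s ∧ p.2 ≠ 2 ∧ p.2 ≠ 3 then (PySem.Set.remove? s p.1).getD s
        else if p.1 ∉ s ∧ p.2 = 3 then s.add p.1
        else s) t' rest := by
      rw [ht'def]
      rfl
    rw [hfold]
    refine ⟨ihnd, ?_⟩
    intro x
    rw [ihmem x]
    by_cases hx : x = n
    · subst hx
      have h1 : ∀ v', (x, v') ∉ rest := fun v' hv' => hnk (List.mem_map_of_mem hv')
      constructor
      · rintro (⟨v', hv', _⟩ | ⟨hxt', _⟩)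
        · exact absurd hv' (h1 v')
        · exact Or.inl ⟨v, List.mem_cons_self, ht'n.mp hxt'⟩
      · rintro (⟨v', hv', hr⟩ | ⟨_, hcon⟩)
        · rcases List.mem_cons.mp hv' with he | hv''
          · have : v' = v := (Prod.mk.injEq _ _ _ _).mp he |>.2
            subst this
            exact Or.inr ⟨ht'n.mpr hr, hnk⟩
          · exact absurd hv'' (h1 v')
        · exact absurd (List.mem_map_of_mem (l := (x, v) :: rest) (f := Prod.fst)
            List.mem_cons_self) hcon
    · have hxt' : x ∈ t' ↔ x ∈ t := ht'mem x hx
      have hxk : x ∈ (((n, v) :: rest).map Prod.fst) ↔ x ∈ rest.map Prod.fst := by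
        simp only [List.map_cons, List.mem_cons]
        exact ⟨fun h => h.resolve_left hx, Or.inr⟩
      have hxi : ∀ v', ((x, v') ∈ (n, v) :: rest ↔ (x, v') ∈ rest) := by
        intro v'
        simp only [List.mem_cons, Prod.mk.injEq]
        exact ⟨fun h => h.resolve_left (fun he => hx he.1), Or.inr⟩
      constructor
      · rintro (⟨v', hv', hr⟩ | ⟨hxt, hnr⟩)
        · exact Or.inl ⟨v', (hxi v').mpr hv', hr⟩
        · exact Or.inr ⟨hxt'.mp hxt, fun h => hnr (hxk.mp h)⟩
      · rintro (⟨v', hv', hr⟩ | ⟨hxt, hnr⟩)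
        · exact Or.inl ⟨v', (hxi v').mp hv', hr⟩
        · exact Or.inr ⟨hxt'.mpr hxt, fun h => hnr (hxk.mpr h)⟩

-- characterization of A's one_cycle
lemma pv_cycleA (s : List pvCell) (hs : s.Nodup) :
    (part2_cycle s).Nodup ∧
    ∀ x, (x ∈ part2_cycle s ↔ (pvCand s x ∧ pvRule (x ∈ s) ((pvCnt s x : Int)))) := by
  have h1 : (s.foldl (fun d node =>
      (part2_neighbors node).foldl (fun d neighbor =>
        if d.getD neighbor 0 ≠ 0 then d.insert neighbor (d.getD neighbor 0 + 1)
        else d.insert neighbor 1) d) (∅ : Std.HashMap pvCell Int)) =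
      ((s.flatMap pvNbrs).foldl (fun d neighbor => d.insert neighbor (d.getD neighbor 0 + 1))
        (∅ : Std.HashMap pvCell Int)) := by
    simp only [pv_neighbors_eq]
    rw [← List.foldl_flatMap]
    congr 1
    exact pv_loop1_body
  unfold part2_cycle
  rw [h1]
  set e1 : Std.HashMap pvCell Int :=
    (s.flatMap pvNbrs).foldl (fun d neighbor => d.insert neighbor (d.getD neighbor 0 + 1))
      (∅ : Std.HashMap pvCell Int) with he1
  set e2 : Std.HashMap pvCell Int :=
    s.foldl (fun d node => if d.contains node then d else d.insert node 0) e1 with he2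
  have hget1 : ∀ x, e1.getD x 0 = ((s.flatMap pvNbrs).count x : Int) := by
    intro x
    rw [he1, pv_hm_getD]
    simp
  have hcon1 : ∀ x, (e1.contains x = true ↔ x ∈ s.flatMap pvNbrs) := by
    intro x
    rw [he1, pv_hm_contains]
    simp
  have hget2 : ∀ x, e2.getD x 0 = ((pvCnt s x : Nat) : Int) := by
    intro x
    rw [he2, (pv_loop2 s e1).1 x, hget1, pv_count_flat s hs x]
  have hcon2 : ∀ x, (e2.contains x = true ↔ pvCand s x) := by
    intro x
    rw [he2, (pv_loop2 s e1).2 x, hcon1 x]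
    unfold pvCand
    simp only [List.mem_flatMap, pvNbrs, List.mem_map]
    constructor
    · rintro (⟨m, hm, d, hd, rfl⟩ | hx)
      · exact Or.inr ⟨m, hm, d, hd, rfl⟩
      · exact Or.inl hx
    · rintro (hx | ⟨m, hm, d, hd, rfl⟩)
      · exact Or.inr hx
      · exact Or.inl ⟨m, hm, d, hd, rfl⟩
  have hitem : ∀ x v, ((x, v) ∈ e2.toList ↔ (pvCand s x ∧ v = e2.getD x 0)) := by
    intro x v
    rw [pv_item_iff, hcon2]
  have hmk : ∀ x, (x ∈ e2.toList.map Prod.fst ↔ pvCand s x) := by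
    intro x
    rw [pv_memKeys, hcon2]
  obtain ⟨l3nd, l3mem⟩ := pv_L3 e2.toList s s hs (pv_keysNodup e2) (fun p _ => Iff.rfl)
  refine ⟨l3nd, fun x => ?_⟩
  rw [l3mem x]
  constructor
  · rintro (⟨v, hv, hr⟩ | ⟨hxs, hnk'⟩)
    · obtain ⟨hk, rfl⟩ := (hitem x v).mp hv
      rw [hget2 x] at hr
      exact ⟨hk, hr⟩
    · exact absurd ((hmk x).mpr (Or.inl hxs)) hnk'
  · rintro ⟨hc, hr⟩
    refine Or.inl ⟨e2.getD x 0, (hitem x _).mpr ⟨hc, rfl⟩, ?_⟩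
    rwa [hget2 x]

-- ===== B-side lemmas: the lexicographic order =====
lemma pvle_iff (a b : pvCell) : pvle a b ↔
    (a.1 < b.1 ∨ (a.1 = b.1 ∧ (a.2.1 < b.2.1 ∨ (a.2.1 = b.2.1 ∧
      (a.2.2.1 < b.2.2.1 ∨ (a.2.2.1 = b.2.2.1 ∧ a.2.2.2 ≤ b.2.2.2)))))) := by
  simp [pvle, pvLe4]

lemma pvle_total (a b : pvCell) : pvle a b ∨ pvle b a := by
  rw [pvle_iff, pvle_iff]; omega

lemma pvle_trans {a b c : pvCell} : pvle a b → pvle b c → pvle a c := by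
  rw [pvle_iff, pvle_iff, pvle_iff]; omega

lemma pvle_antisymm {a b : pvCell} : pvle a b → pvle b a → a = b := by
  obtain ⟨a1, a2, a3, a4⟩ := a; obtain ⟨b1, b2, b3, b4⟩ := b
  rw [pvle_iff, pvle_iff]
  simp only [Prod.ext_iff]
  omega

lemma pvle_add_left (c a b : pvCell) : pvle (pvAdd4 c a) (pvAdd4 c b) ↔ pvle a b := by
  obtain ⟨c1, c2, c3, c4⟩ := c; obtain ⟨a1, a2, a3, a4⟩ := a; obtain ⟨b1, b2, b3, b4⟩ := b
  rw [pvle_iff, pvle_iff]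
  simp only [pvAdd4]
  omega

-- ===== B-side lemmas: merging =====
lemma pv_mergeGo_eq : ∀ (xs ys out : List pvCell),
    part2_alt_merge out xs ys = out.reverse ++ pvMerge xs ys := by
  intro xs ys
  induction xs, ys using pvMerge.induct with
  | case1 ys => intro out; simp [part2_alt_merge, pvMerge]
  | case2 x xs => intro out; simp [part2_alt_merge, pvMerge]
  | case3 x xs y ys hle ih =>
    intro out
    rw [part2_alt_merge, pvMerge, if_pos hle, if_pos hle, ih]
    simp
  | case4 x xs y ys hle ih =>
    intro out
    rw [part2_alt_merge, pvMerge, if_neg hle, if_neg hle, ih]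
    simp

lemma pv_count_merge : ∀ (xs ys : List pvCell) (x : pvCell),
    (pvMerge xs ys).count x = xs.count x + ys.count x := by
  intro xs ys
  induction xs, ys using pvMerge.induct with
  | case1 ys => intro x; simp [pvMerge]
  | case2 x xs => intro x; simp [pvMerge]
  | case3 a xs b ys hle ih =>
    intro x
    rw [pvMerge, if_pos hle]
    simp only [List.count_cons, ih]
    omega
  | case4 a xs b ys hle ih =>
    intro x
    rw [pvMerge, if_neg hle]
    simp only [List.count_cons, ih]
    omega

lemma pv_mem_merge : ∀ (xs ys : List pvCell) (z : pvCell),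
    (z ∈ pvMerge xs ys ↔ z ∈ xs ∨ z ∈ ys) := by
  intro xs ys z
  rw [← List.count_pos_iff, pv_count_merge, ← List.count_pos_iff, ← List.count_pos_iff]
  omega

lemma pv_sorted_merge : ∀ (xs ys : List pvCell),
    xs.Pairwise pvle → ys.Pairwise pvle → (pvMerge xs ys).Pairwise pvle := by
  intro xs ys
  induction xs, ys using pvMerge.induct with
  | case1 ys => intro _ h; simpa [pvMerge] using h
  | case2 x xs => intro h _; simpa [pvMerge] using h
  | case3 a xs b ys hle ih =>
    intro hxs hys
    rw [pvMerge, if_pos hle]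
    obtain ⟨ha, hxs'⟩ := List.pairwise_cons.mp hxs
    refine List.pairwise_cons.mpr ⟨?_, ih hxs' hys⟩
    intro z hz
    rcases (pv_mem_merge _ _ z).mp hz with h | h
    · exact ha z h
    · rcases List.mem_cons.mp h with rfl | h
      · exact hle
      · exact pvle_trans hle ((List.pairwise_cons.mp hys).1 z h)
  | case4 a xs b ys hle ih =>
    intro hxs hys
    rw [pvMerge, if_neg hle]
    obtain ⟨hb, hys'⟩ := List.pairwise_cons.mp hys
    have hba : pvle b a := (pvle_total a b).resolve_left hle
    refine List.pairwise_cons.mpr ⟨?_, ih hxs hys'⟩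
    intro z hz
    rcases (pv_mem_merge _ _ z).mp hz with h | h
    · rcases List.mem_cons.mp h with rfl | h
      · exact hba
      · exact pvle_trans hba ((List.pairwise_cons.mp hxs).1 z h)
    · exact hb z h

lemma pv_count_mergePairs : ∀ (ls : List (List pvCell)) (x : pvCell),
    ((part2_alt_mergePairs ls).map (fun l => l.count x)).sum = (ls.map (fun l => l.count x)).sum
  | [] => by intro x; simp [part2_alt_mergePairs]
  | [_] => by intro x; simp [part2_alt_mergePairs]
  | a :: b :: t => by
    intro x
    simp only [part2_alt_mergePairs, List.map_cons, List.sum_cons]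
    rw [pv_count_mergePairs t x, pv_mergeGo_eq, List.reverse_nil, List.nil_append,
      pv_count_merge]
    omega

lemma pv_count_mergeAll : ∀ (ls : List (List pvCell)) (x : pvCell),
    (part2_alt_mergeAll ls).count x = (ls.map (fun l => l.count x)).sum := by
  intro ls
  induction ls using part2_alt_mergeAll.induct with
  | case1 => intro x; simp [part2_alt_mergeAll]
  | case2 l => intro x; simp [part2_alt_mergeAll]
  | case3 a b t ih =>
    intro x
    rw [part2_alt_mergeAll, ih, pv_count_mergePairs]

lemma pv_sorted_mergePairs : ∀ (ls : List (List pvCell)),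
    (∀ l ∈ ls, l.Pairwise pvle) → (∀ l ∈ part2_alt_mergePairs ls, l.Pairwise pvle)
  | [] => by intro h; exact h
  | [x] => by intro h; exact h
  | a :: b :: t => by
    intro h l hl
    simp only [part2_alt_mergePairs, List.mem_cons] at hl
    rcases hl with rfl | hl
    · rw [pv_mergeGo_eq, List.reverse_nil, List.nil_append]
      exact pv_sorted_merge a b (h a (by simp)) (h b (by simp))
    · exact pv_sorted_mergePairs t (fun l' hl' => h l' (by simp [hl'])) l hl

lemma pv_sorted_mergeAll : ∀ (ls : List (List pvCell)),
    (∀ l ∈ ls, l.Pairwise pvle) → (part2_alt_mergeAll ls).Pairwise pvle := by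
  intro ls
  induction ls using part2_alt_mergeAll.induct with
  | case1 => intro _; simp [part2_alt_mergeAll]
  | case2 l => intro h; exact (by simpa [part2_alt_mergeAll] using h l (by simp))
  | case3 a b t ih =>
    intro h
    rw [part2_alt_mergeAll]
    exact ih (pv_sorted_mergePairs _ h)

-- ===== B-side lemmas: the run-length scan =====
lemma pv_sel_out (active : List pvCell) : ∀ (l : List pvCell) (rc : Option pvCell)
    (rl : Int) (out : List pvCell),
    part2_alt_sel active l rc rl out = out ++ part2_alt_sel active l rc rl [] := by
  intro l
  induction l with
  | nil => intro rc rl out; simp [part2_alt_sel]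
  | cons c rest ih =>
    intro rc rl out
    by_cases hb : (match rc with | some r => (c == r : Bool) | none => false) = true
    · simp only [part2_alt_sel, if_pos hb]
      exact ih rc (rl + 1) out
    · simp only [part2_alt_sel, if_neg hb, List.nil_append]
      rw [ih _ _ (out ++ part2_alt_flush active rc rl), ih _ _ (part2_alt_flush active rc rl)]
      simp [List.append_assoc]

-- after a sorted tail all of whose elements dominate c, dropping the leading run of c
-- leaves only cells strictly above c
lemma pv_dropWhile_ne (c : pvCell) : ∀ (rest : List pvCell), rest.Pairwise pvle →
    (∀ y ∈ rest, pvle c y) →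
    ∀ y ∈ rest.dropWhile (fun y => y == c), pvle c y ∧ y ≠ c := by
  intro rest
  induction rest with
  | nil => intro _ _ y hy; simp at hy
  | cons a t ih =>
    intro hp hall y hy
    by_cases ha : (a == c) = true
    · rw [List.dropWhile_cons, if_pos ha] at hy
      exact ih (List.pairwise_cons.mp hp).2 (fun z hz => hall z (List.mem_cons_of_mem _ hz)) y hy
    · rw [List.dropWhile_cons, if_neg ha] at hy
      have hac : a ≠ c := by simpa using ha
      rcases List.mem_cons.mp hy with rfl | hy
      · exact ⟨hall y List.mem_cons_self, hac⟩
      · refine ⟨hall y (List.mem_cons_of_mem _ hy), ?_⟩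
        rintro rfl
        exact hac (pvle_antisymm ((List.pairwise_cons.mp hp).1 y hy)
          (hall a List.mem_cons_self))

lemma pv_sel_run (active : List pvCell) : ∀ (rest : List pvCell) (r : pvCell) (rl : Int)
    (out : List pvCell), rest.Pairwise pvle → (∀ y ∈ rest, pvle r y) →
    part2_alt_sel active rest (some r) rl out =
      out ++ part2_alt_flush active (some r) (rl + (rest.count r : Int)) ++
        part2_alt_sel active (rest.dropWhile (fun y => y == r)) none 0 [] := by
  intro rest
  induction rest with
  | nil =>
    intro r rl out _ _
    simp [part2_alt_sel, part2_alt_flush]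
  | cons cell rest ih =>
    intro r rl out hp hall
    by_cases hb : (cell == r) = true
    · have hcr : cell = r := by simpa using hb
      simp only [part2_alt_sel, if_pos hb]
      rw [ih r (rl + 1) out (List.pairwise_cons.mp hp).2
        (fun z hz => hall z (List.mem_cons_of_mem _ hz))]
      have h1 : rl + 1 + ((rest.count r : Nat) : Int) =
          rl + (((cell :: rest).count r : Nat) : Int) := by
        rw [List.count_cons, if_pos hb]
        push_cast
        ring
      rw [h1, List.dropWhile_cons, if_pos hb]
    · have hcr : cell ≠ r := by simpa using hb
      have hrnot : r ∉ rest := by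
        intro hr
        exact hcr (pvle_antisymm ((List.pairwise_cons.mp hp).1 r hr)
          (hall cell List.mem_cons_self))
      have hcount : (cell :: rest).count r = 0 := by
        rw [List.count_cons, if_neg hb, List.count_eq_zero.mpr hrnot]
      simp only [part2_alt_sel, if_neg hb]
      rw [pv_sel_out, hcount, List.dropWhile_cons, if_neg hb]
      have h2 : part2_alt_sel active (cell :: rest) none 0 [] =
          part2_alt_sel active rest (some cell) 1 [] := by
        simp [part2_alt_sel, part2_alt_flush]
      rw [h2]
      have h3 : rl + ((0 : Nat) : Int) = rl := by push_cast; ring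
      rw [h3]
      try simp [List.append_assoc]

lemma pv_sel_spec (active : List pvCell) : ∀ (n : Nat) (trans : List pvCell),
    trans.length ≤ n → trans.Pairwise pvle →
    (part2_alt_sel active trans none 0 []).Nodup ∧
    (part2_alt_sel active trans none 0 []).Pairwise pvle ∧
    ∀ x, (x ∈ part2_alt_sel active trans none 0 [] ↔
      (x ∈ trans ∧ (((trans.count x : Nat) : Int) = 3 ∨
        (((trans.count x : Nat) : Int) = 2 ∧ x ∈ active)))) := by
  intro n
  induction n with
  | zero =>
    intro trans hlen _
    have : trans = [] := List.eq_nil_of_length_eq_zero (Nat.le_zero.mp hlen)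
    subst this
    simp [part2_alt_sel, part2_alt_flush]
  | succ n ih =>
    intro trans hlen hsort
    match trans with
    | [] => simp [part2_alt_sel, part2_alt_flush]
    | c :: rest =>
      obtain ⟨hhead, htail⟩ := List.pairwise_cons.mp hsort
      have e1 : part2_alt_sel active (c :: rest) none 0 [] =
          part2_alt_sel active rest (some c) 1 [] := by
        simp [part2_alt_sel, part2_alt_flush]
      set rest' := rest.dropWhile (fun y => y == c) with hrest'
      have e2 := pv_sel_run active rest c 1 [] htail hhead
      rw [e1, e2, List.nil_append]
      have hdw : ∀ y ∈ rest', pvle c y ∧ y ≠ c := pv_dropWhile_ne c rest htail hhead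
      have hsub : List.Sublist rest' rest := List.dropWhile_sublist _
      have hlen' : rest'.length ≤ n := le_trans hsub.length_le (Nat.le_of_succ_le_succ hlen)
      have hsort' : rest'.Pairwise pvle := htail.sublist hsub
      obtain ⟨ihnd, ihsort, ihmem⟩ := ih rest' hlen' hsort'
      -- counts
      have hsplit : rest.takeWhile (fun y => y == c) ++ rest' = rest :=
        List.takeWhile_append_dropWhile
      have htk : ∀ y ∈ rest.takeWhile (fun y => y == c), y = c := by
        intro y hy
        have := List.mem_takeWhile_imp hy
        simpa using this
      have hcount_c : (c :: rest).count c = 1 + rest.count c := by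
        rw [List.count_cons, if_pos (by simp)]
        omega
      have hcount_ne : ∀ x, x ≠ c → (c :: rest).count x = rest'.count x := by
        intro x hx
        rw [List.count_cons, if_neg (by simp only [beq_iff_eq]; exact fun h => hx h.symm),
          ← hsplit, List.count_append]
        have : (rest.takeWhile (fun y => y == c)).count x = 0 :=
          List.count_eq_zero.mpr (fun hmem => hx (htk x hmem))
        omega
      have hmem_ne : ∀ x, x ≠ c → (x ∈ c :: rest ↔ x ∈ rest') := by
        intro x hx
        rw [← List.count_pos_iff, ← List.count_pos_iff, hcount_ne x hx]
      -- flush facts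
      set K : Int := 1 + ((rest.count c : Nat) : Int) with hK
      have hKcount : K = (((c :: rest).count c : Nat) : Int) := by
        rw [hcount_c]
        push_cast
        ring
      have hflush_sub : ∀ y ∈ part2_alt_flush active (some c) K, y = c := by
        intro y hy
        simp only [part2_alt_flush] at hy
        split at hy
        · simpa using hy
        · simp at hy
      have hflush_mem : c ∈ part2_alt_flush active (some c) K ↔
          (K = 3 ∨ (K = 2 ∧ c ∈ active)) := by
        simp only [part2_alt_flush]
        split
        · rename_i h
          simp [h]
        · rename_i h
          simp [h]
      have hcore_sub : ∀ y ∈ part2_alt_sel active rest' none 0 [], pvle c y ∧ y ≠ c := by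
        intro y hy
        exact hdw y ((ihmem y).mp hy).1
      refine ⟨?_, ?_, ?_⟩
      · -- Nodup
        refine List.Nodup.append ?_ ihnd ?_
        · simp only [part2_alt_flush]
          split
          · exact List.Pairwise.cons (fun z hz => (List.not_mem_nil hz).elim) List.Pairwise.nil
          · exact List.Pairwise.nil
        · intro y hy hy'
          exact (hcore_sub y hy').2 (hflush_sub y hy)
      · -- Pairwise
        rw [List.pairwise_append]
        refine ⟨?_, ihsort, ?_⟩
        · simp only [part2_alt_flush]
          split
          · exact List.Pairwise.cons (fun z hz => (List.not_mem_nil hz).elim) List.Pairwise.nil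
          · exact List.Pairwise.nil
        · intro y hy z hz
          rw [hflush_sub y hy]
          exact (hcore_sub z hz).1
      · -- membership
        intro x
        rw [List.mem_append, ihmem x]
        by_cases hx : x = c
        · subst hx
          constructor
          · rintro (hf | hcore)
            · refine ⟨List.mem_cons_self, ?_⟩
              rw [← hKcount]
              exact hflush_mem.mp hf
            · exact absurd rfl (hdw x hcore.1).2
          · rintro ⟨_, hr⟩
            left
            rw [← hKcount] at hr
            exact hflush_mem.mpr hr
        · constructor
          · rintro (hf | hcore)
            · exact absurd (hflush_sub x hf) hx
            · obtain ⟨hm, hr⟩ := hcore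
              refine ⟨(hmem_ne x hx).mpr hm, ?_⟩
              rw [hcount_ne x hx]
              exact hr
          · rintro ⟨hm, hr⟩
            right
            refine ⟨(hmem_ne x hx).mp hm, ?_⟩
            rw [← hcount_ne x hx]
            exact hr

-- characterization of B's cycle
lemma pv_cycleB (b : List pvCell) (hb : b.Nodup) :
    (part2_alt_cycle b).Nodup ∧
    ∀ x, (x ∈ part2_alt_cycle b ↔
      (((pvCnt b x : Nat) : Int) = 3 ∨ (((pvCnt b x : Nat) : Int) = 2 ∧ x ∈ b))) := by
  unfold part2_alt_cycle
  set trans := part2_alt_mergeAll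
    (b.map (fun c => part2_alt_offsets.map (fun d => pvAdd4 c d))) with htrans
  have hsorted : trans.Pairwise pvle := by
    rw [htrans]
    refine pv_sorted_mergeAll _ ?_
    intro l hl
    obtain ⟨c, _, rfl⟩ := List.mem_map.mp hl
    exact List.pairwise_map.mpr (pv_off_sorted.imp (fun h => (pvle_add_left c _ _).mpr h))
  have hcnt : ∀ x, trans.count x = pvCnt b x := by
    intro x
    rw [htrans, pv_count_mergeAll, List.map_map, ← pv_count_flat b hb x, List.count_flatMap]
    congr 1
  obtain ⟨snd, _, smem⟩ := pv_sel_spec b trans.length trans le_rfl hsorted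
  refine ⟨snd, fun x => ?_⟩
  rw [smem x, hcnt x]
  constructor
  · rintro ⟨_, hr⟩
    exact hr
  · intro hr
    refine ⟨?_, hr⟩
    rw [← List.count_pos_iff, hcnt x]
    rcases hr with h3 | ⟨h2, _⟩
    · omega
    · omega

-- one cycle preserves the invariant: A-set and B-list nodup, B sorted, same members
lemma pv_cycle_equiv (s b : List pvCell) (hs : s.Nodup) (hb : b.Nodup)
    (h : ∀ x, x ∈ s ↔ x ∈ b) :
    (part2_cycle s).Nodup ∧ (part2_alt_cycle b).Nodup ∧
    ∀ x, (x ∈ part2_cycle s ↔ x ∈ part2_alt_cycle b) := by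
  obtain ⟨hand, hamem⟩ := pv_cycleA s hs
  obtain ⟨hbnd, hbmem⟩ := pv_cycleB b hb
  refine ⟨hand, hbnd, fun x => ?_⟩
  rw [hamem x, hbmem x]
  have hcnt : pvCnt s x = pvCnt b x := by
    unfold pvCnt
    exact List.countP_congr (fun d _ => by simp [h (pvAdd4 x d)])
  rw [hcnt]
  constructor
  · rintro ⟨_, hrule⟩
    rcases hrule with ⟨hb', hv⟩ | ⟨_, hv⟩
    · rcases hv with hv | hv
      · exact Or.inr ⟨hv, (h x).mp hb'⟩
      · exact Or.inl hv
    · exact Or.inl hv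
  · intro hr
    have hcand : pvCand s x := by
      by_cases hxs : x ∈ s
      · exact Or.inl hxs
      · have h3 : ((pvCnt b x : Nat) : Int) = 3 := by
          rcases hr with h3 | ⟨_, hxb⟩
          · exact h3
          · exact absurd ((h x).mpr hxb) hxs
        have hpos : 0 < pvCnt b x := by omega
        rw [← hcnt] at hpos
        obtain ⟨d, hd, hds⟩ := List.countP_pos_iff.mp hpos
        have hms : pvAdd4 x d ∈ s := by simpa using hds
        exact Or.inr ⟨pvAdd4 x d, hms, pvNeg4 d, pv_off_neg d hd,
          (pvAdd4_neg_cancel x d).symm⟩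
    refine ⟨hcand, ?_⟩
    unfold pvRule
    by_cases hxs : x ∈ s
    · rcases hr with h3 | ⟨h2, _⟩
      · exact Or.inl ⟨hxs, Or.inr h3⟩
      · exact Or.inl ⟨hxs, Or.inl h2⟩
    · rcases hr with h3 | ⟨_, hxb⟩
      · exact Or.inr ⟨hxs, h3⟩
      · exact absurd ((h x).mpr hxb) hxs

-- a nodup-preserving conditional-accumulation fold
lemma pv_foldl_cond {β : Type} (step : PySem.Set pvCell → β → PySem.Set pvCell)
    (Q : β → pvCell → Prop)
    (h : ∀ s a, s.Nodup → ((step s a).Nodup ∧ ∀ x, (x ∈ step s a ↔ x ∈ s ∨ Q a x))) :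
    ∀ (l : List β) (s0 : PySem.Set pvCell), s0.Nodup →
      ((l.foldl step s0).Nodup ∧ ∀ x, (x ∈ l.foldl step s0 ↔ x ∈ s0 ∨ ∃ a ∈ l, Q a x)) := by
  intro l
  induction l with
  | nil => intro s0 h0; simpa using h0
  | cons a l ih =>
    intro s0 h0
    obtain ⟨h1, h2⟩ := h s0 a h0
    obtain ⟨h3, h4⟩ := ih (step s0 a) h1
    rw [List.foldl_cons]
    refine ⟨h3, fun x => ?_⟩
    rw [h4 x, h2 x]
    constructor
    · rintro ((hx | hq) | ⟨b, hb, hq⟩)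
      · exact Or.inl hx
      · exact Or.inr ⟨a, List.mem_cons_self, hq⟩
      · exact Or.inr ⟨b, List.mem_cons_of_mem _ hb, hq⟩
    · rintro (hx | ⟨b, hb, hq⟩)
      · exact Or.inl (Or.inl hx)
      · rcases List.mem_cons.mp hb with rfl | hb
        · exact Or.inl (Or.inr hq)
        · exact Or.inr ⟨b, hb, hq⟩

-- A's grid parse: nodup and membership
lemma pv_initA (lines : List String) :
    ((PySem.List.enumerate lines 0).foldl (fun s il =>
      (PySem.List.enumerate il.2.toList 0).foldl (fun s jc =>
        if jc.2 = '#' then PySem.Set.add s ((jc.1, -il.1, (0 : Int), (0 : Int)) : pvCell) else s) s)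
      PySem.Set.empty).Nodup ∧
    ∀ x, (x ∈ (PySem.List.enumerate lines 0).foldl (fun s il =>
      (PySem.List.enumerate il.2.toList 0).foldl (fun s jc =>
        if jc.2 = '#' then PySem.Set.add s ((jc.1, -il.1, (0 : Int), (0 : Int)) : pvCell) else s) s)
      PySem.Set.empty ↔
      ∃ il ∈ PySem.List.enumerate lines 0, ∃ jc ∈ PySem.List.enumerate il.2.toList 0,
        jc.2 = '#' ∧ x = ((jc.1, -il.1, (0 : Int), (0 : Int)) : pvCell)) := by
  have houter := pv_foldl_cond
    (fun s il => (PySem.List.enumerate il.2.toList 0).foldl (fun s jc =>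
      if jc.2 = '#' then PySem.Set.add s ((jc.1, -il.1, (0 : Int), (0 : Int)) : pvCell) else s) s)
    (fun (il : Int × String) x => ∃ jc ∈ PySem.List.enumerate il.2.toList 0,
      jc.2 = '#' ∧ x = ((jc.1, -il.1, (0 : Int), (0 : Int)) : pvCell))
    (by
      intro s il hsnd
      have hinner := pv_foldl_cond
        (fun s jc => if jc.2 = '#' then PySem.Set.add s ((jc.1, -il.1, (0 : Int), (0 : Int)) : pvCell) else s)
        (fun (jc : Int × Char) x => jc.2 = '#' ∧ x = ((jc.1, -il.1, (0 : Int), (0 : Int)) : pvCell))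
        (by
          intro s jc hnd
          dsimp only
          by_cases hc : jc.2 = '#'
          · rw [if_pos hc]
            refine ⟨PySem.Set.nodup_add _ _ hnd, fun x => ?_⟩
            rw [PySem.Set.mem_add]
            exact ⟨fun h => h.imp_right (fun he => ⟨hc, he⟩), fun h => h.imp_right (fun he => he.2)⟩
          · rw [if_neg hc]
            exact ⟨hnd, fun x => ⟨Or.inl, fun h => h.resolve_right (fun he => hc he.1)⟩⟩)
        (PySem.List.enumerate il.2.toList 0) s hsnd
      exact hinner)
    (PySem.List.enumerate lines 0) PySem.Set.empty (by simp [PySem.Set.empty])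
  refine ⟨houter.1, fun x => ?_⟩
  rw [houter.2 x]
  constructor
  · rintro (hx | hq)
    · simp [PySem.Set.empty] at hx
    · exact hq
  · exact Or.inr

-- B's parsed cell list (before sorting)
def pvParsed (lines : List String) : List pvCell :=
  (PySem.List.enumerate lines 0).flatMap (fun il =>
    (PySem.List.enumerate il.2.toList 0).filterMap (fun jc =>
      if jc.2 = '#' then some ((jc.1, -il.1, (0 : Int), (0 : Int)) : pvCell) else none))

lemma pv_parsed_mem (lines : List String) (x : pvCell) :
    x ∈ pvParsed lines ↔
    ∃ il ∈ PySem.List.enumerate lines 0, ∃ jc ∈ PySem.List.enumerate il.2.toList 0,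
      jc.2 = '#' ∧ x = ((jc.1, -il.1, (0 : Int), (0 : Int)) : pvCell) := by
  unfold pvParsed
  simp only [List.mem_flatMap, List.mem_filterMap]
  constructor
  · rintro ⟨il, hil, jc, hjc, hsome⟩
    by_cases hc : jc.2 = '#'
    · rw [if_pos hc] at hsome
      exact ⟨il, hil, jc, hjc, hc, (Option.some.injEq _ _).mp hsome |>.symm⟩
    · rw [if_neg hc] at hsome
      simp at hsome
  · rintro ⟨il, hil, jc, hjc, hc, rfl⟩
    exact ⟨il, hil, jc, hjc, by rw [if_pos hc]⟩

-- pairwise through filterMap: related inputs yield related outputs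
lemma pv_pairwise_filterMap {α β : Type} (S : α → α → Prop) (R : β → β → Prop)
    (g : α → Option β) : ∀ (l : List α), l.Pairwise S →
    (∀ a b x y, S a b → g a = some x → g b = some y → R x y) →
    (l.filterMap g).Pairwise R := by
  intro l
  induction l with
  | nil => intro _ _; simp
  | cons a t ih =>
    intro hp himp
    obtain ⟨ha, ht⟩ := List.pairwise_cons.mp hp
    rw [List.filterMap_cons]
    cases hg : g a with
    | none => exact ih ht himp
    | some x =>
      refine List.pairwise_cons.mpr ⟨?_, ih ht himp⟩
      intro y hy
      obtain ⟨b, hb, hgb⟩ := List.mem_filterMap.mp hy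
      exact himp a b x y (ha b hb) hg hgb

-- pairwise through flatMap
lemma pv_pairwise_flatMap {α β : Type} (S : α → α → Prop) (R : β → β → Prop)
    (f : α → List β) : ∀ (l : List α), l.Pairwise S →
    (∀ a ∈ l, (f a).Pairwise R) →
    (∀ a b, S a b → ∀ x ∈ f a, ∀ y ∈ f b, R x y) →
    (l.flatMap f).Pairwise R := by
  intro l
  induction l with
  | nil => intro _ _ _; simp
  | cons a t ih =>
    intro hp hin hcross
    obtain ⟨ha, ht⟩ := List.pairwise_cons.mp hp
    rw [List.flatMap_cons]
    rw [List.pairwise_append]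
    refine ⟨hin a List.mem_cons_self,
      ih ht (fun b hb => hin b (List.mem_cons_of_mem _ hb))
        (fun b b' hS => hcross b b' hS), ?_⟩
    intro x hx y hy
    obtain ⟨b, hb, hyb⟩ := List.mem_flatMap.mp hy
    exact hcross a b (ha b hb) x hx y hyb

-- enumerate produces strictly increasing indices
lemma pv_enum_pairwise {α : Type} (xs : List α) (s : Int) :
    (PySem.List.enumerate xs s).Pairwise (fun p q => p.1 < q.1) := by
  have h1 : ((PySem.List.enumerate xs s).map Prod.fst).Pairwise (· < ·) := by
    rw [PySem.List.map_fst_enumerate]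
    exact PySem.List.pairwise_lt_pyRange_one _ _
  exact List.pairwise_map.mp h1

lemma pv_parsed_nodup (lines : List String) : (pvParsed lines).Nodup := by
  have hpair : (pvParsed lines).Pairwise
      (fun u v => u.2.1 > v.2.1 ∨ (u.2.1 = v.2.1 ∧ u.1 < v.1)) := by
    unfold pvParsed
    refine pv_pairwise_flatMap _ _ _ _ (pv_enum_pairwise lines 0) ?_ ?_
    · intro il _
      refine pv_pairwise_filterMap (fun p q => p.1 < q.1) _ _ _
        (pv_enum_pairwise il.2.toList 0) ?_
      intro a b x y hS hga hgb
      have hxa : a.2 = '#' ∧ x = ((a.1, -il.1, (0 : Int), (0 : Int)) : pvCell) := by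
        split at hga
        · exact ⟨by assumption, by simpa using hga.symm⟩
        · simp at hga
      have hyb : b.2 = '#' ∧ y = ((b.1, -il.1, (0 : Int), (0 : Int)) : pvCell) := by
        split at hgb
        · exact ⟨by assumption, by simpa using hgb.symm⟩
        · simp at hgb
      rw [hxa.2, hyb.2]
      exact Or.inr ⟨rfl, hS⟩
    · intro a b hS x hx y hy
      obtain ⟨jc, _, hjc⟩ := List.mem_filterMap.mp hx
      obtain ⟨kc, _, hkc⟩ := List.mem_filterMap.mp hy
      have hxv : x.2.1 = -a.1 := by
        split at hjc
        · have := (Option.some.injEq _ _).mp hjc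
          rw [← this]
        · simp at hjc
      have hyv : y.2.1 = -b.1 := by
        split at hkc
        · have := (Option.some.injEq _ _).mp hkc
          rw [← this]
        · simp at hkc
      rw [hxv, hyv]
      exact Or.inl (by omega)
  refine hpair.imp ?_
  intro u v huv
  rintro rfl
  rcases huv with h | ⟨_, h⟩ <;> omega

lemma pv_initB (lines : List String) :
    (part2_alt_mergeAll ((pvParsed lines).map (fun c => [c]))).Nodup ∧
    ∀ x, (x ∈ part2_alt_mergeAll ((pvParsed lines).map (fun c => [c])) ↔ x ∈ pvParsed lines) := by
  have hc : ∀ x, (part2_alt_mergeAll ((pvParsed lines).map (fun c => [c]))).count x =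
      (pvParsed lines).count x := by
    intro x
    rw [pv_count_mergeAll, List.map_map]
    have h1 : ((pvParsed lines).map ((fun l => l.count x) ∘ (fun c => [c]))) =
        (pvParsed lines).map (fun c => if (fun c => c == x) c = true then 1 else 0) := by
      refine List.map_congr_left ?_
      intro c _
      simp [Function.comp, List.count_cons]
    rw [h1, PySem.List.sum_map_ite_one_zero_nat]
    rfl
  have hnd : (part2_alt_mergeAll ((pvParsed lines).map (fun c => [c]))).Nodup := by
    rw [List.nodup_iff_count_le_one]
    intro x
    rw [hc x]
    exact List.nodup_iff_count_le_one.mp (pv_parsed_nodup lines) x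
  refine ⟨hnd, ?_⟩
  intro x
  rw [← List.count_pos_iff, ← List.count_pos_iff, hc x]

-- ===== VERDICT (by name: the statement is the Claim_ definition above) =====
theorem part2_spec : Claim_equal_part2 := by
  intro lines _
  unfold Spec_part2 part2 part2_alt
  have h6 : PySem.List.pyRange 0 6 1 = [0, 1, 2, 3, 4, 5] := by decide
  rw [h6]
  simp only [List.foldl_cons, List.foldl_nil]
  obtain ⟨hA0nd, hA0mem⟩ := pv_initA lines
  obtain ⟨hB0nd, hB0mem⟩ := pv_initB lines
  have h0 : ∀ x, (x ∈ (PySem.List.enumerate lines 0).foldl (fun s il =>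
      (PySem.List.enumerate il.2.toList 0).foldl (fun s jc =>
        if jc.2 = '#' then PySem.Set.add s ((jc.1, -il.1, (0 : Int), (0 : Int)) : pvCell) else s) s)
      PySem.Set.empty ↔
      x ∈ part2_alt_mergeAll ((pvParsed lines).map (fun c => [c]))) :=
    fun x => (hA0mem x).trans (((hB0mem x).trans (pv_parsed_mem lines x)).symm)
  obtain ⟨n1, n1', m1⟩ := pv_cycle_equiv _ _ hA0nd hB0nd h0
  obtain ⟨n2, n2', m2⟩ := pv_cycle_equiv _ _ n1 n1' m1
  obtain ⟨n3, n3', m3⟩ := pv_cycle_equiv _ _ n2 n2' m2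
  obtain ⟨n4, n4', m4⟩ := pv_cycle_equiv _ _ n3 n3' m3
  obtain ⟨n5, n5', m5⟩ := pv_cycle_equiv _ _ n4 n4' m4
  obtain ⟨n6, n6', m6⟩ := pv_cycle_equiv _ _ n5 n5' m5
  unfold PySem.Set.len
  exact congrArg _ (((List.perm_ext_iff_of_nodup n6 n6').mpr m6).length_eq)
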